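-- pv_equiv track=rewrite | github.com/TheLaughingDuck/todoist_taskmaker | helpers.py | zip_recycle
-- ===== SOURCE A (Python) =====
-- from itertools import cycle
--
-- def zip_recycle(iterable):
--     """Takes an iterable, where each element is an iterable of elements.
--     The iterables are zipped (by zip), but shorter elements are recycled.
--     The longest element in fill_values will be gone through once."""
--
--     # Handle zero-length iterable
--     if len(iterable) == 0: return([])
--
--     # Regulate zip_recycle to stop once the longest element in fill_values has been passed once
--     longest = max([len(x) for x in iterable])
--     count = 0
--
--     # Unpack list of recycled iterables.
--     zipped_elements = zip(*[cycle(sublist) for sublist in iterable])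
--     for element in zipped_elements:
--         yield element
--
--         count += 1
--         if count >= longest: break
-- ===== SOURCE B (Python) =====
-- def zip_recycle(iterable):
--     """Yield zipped tuples, recycling shorter sublists by modular indexing
--     until the longest sublist has been passed once."""
--     iterable = list(iterable)
--     if not iterable:
--         return
--     lens = [len(s) for s in iterable]
--     if 0 in lens:
--         return
--     longest = max(lens)
--     for i in range(longest):
--         yield tuple(s[i % len(s)] for s in iterable)
-- ===== Notes on version B (the rewrite author's own statement) =====
-- stated objective: simpler
-- what changed: Replaces the per-sublist cycle iterators, zip unpacking and the manual count/break loop by direct modular indexing: one range(longest) loop yielding tuple(s[i % len(s)]), with an explicit early return when any sublist is empty (where A's zip of an empty cycle yields nothing).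
import Mathlib
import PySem

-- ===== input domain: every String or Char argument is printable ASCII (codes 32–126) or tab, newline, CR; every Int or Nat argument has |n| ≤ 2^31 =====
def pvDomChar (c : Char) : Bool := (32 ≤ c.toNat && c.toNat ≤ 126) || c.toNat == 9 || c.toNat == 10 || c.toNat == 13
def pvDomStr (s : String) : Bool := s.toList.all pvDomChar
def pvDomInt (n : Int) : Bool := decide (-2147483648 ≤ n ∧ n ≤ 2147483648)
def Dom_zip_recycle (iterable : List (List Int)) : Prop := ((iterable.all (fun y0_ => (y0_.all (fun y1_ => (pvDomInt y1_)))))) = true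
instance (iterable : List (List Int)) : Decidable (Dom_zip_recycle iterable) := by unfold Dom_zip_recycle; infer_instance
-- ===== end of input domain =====

-- B replaces A's per-sublist cycle iterators + zip + count/break loop by one range(longest)
-- loop with modular indexing; objective: simpler. (A is a generator; values compared as lists.)

-- ===== PORT A =====
-- one step of itertools.cycle: take the next element from the remaining part,
-- refilling from the original sublist when exhausted (never hit with orig = [])
def cycleNext (orig rem : List Int) : Int × List Int :=
  match rem with
  | h :: t => (h, t)
  | [] =>
    match orig with
    | h :: t => (h, t)
    | [] => (0, [])

-- the for-loop over zip(*cycles) with the count-until-longest break, fuel = longest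
def loopA : List (List Int × List Int) → Nat → List (List Int)
  | _, 0 => []
  | states, n + 1 =>
    (states.map fun p => (cycleNext p.1 p.2).1) ::
      loopA (states.map fun p => (p.1, (cycleNext p.1 p.2).2)) n

def zip_recycle (iterable : List (List Int)) : List (List Int) :=
  if iterable.length = 0 then []
  else
    let longest := (iterable.map List.length).max?.getD 0
    -- zip(*[cycle(s) …]): if some sublist is empty its cycle is an empty iterator, zip yields nothing
    if iterable.any List.isEmpty then []
    else loopA (iterable.map fun s => (s, s)) longest

-- ===== PORT B =====
def zip_recycle_alt (iterable : List (List Int)) : List (List Int) :=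
  if iterable = [] then []
  else
    let lens := iterable.map List.length
    if lens.contains 0 then []
    else
      let longest := lens.max?.getD 0
      (List.range longest).map fun i => iterable.map fun s => s.getD (i % s.length) 0

-- ===== PRECONDITION & SPEC =====
def Spec_zip_recycle (iterable : List (List Int)) (out : List (List Int)) : Prop := out = zip_recycle_alt iterable
instance (iterable : List (List Int)) (out : List (List Int)) : Decidable (Spec_zip_recycle iterable out) := by unfold Spec_zip_recycle; infer_instance

-- ===== CLAIM (what is proved, stated in full; the proofs are below) =====
def Claim_equal_zip_recycle : Prop := ∀ (iterable : List (List Int)), Dom_zip_recycle iterable → Spec_zip_recycle iterable (zip_recycle iterable)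

-- ===== LEMMAS AND PROOFS =====

-- invariant of a single cycle state at global step k: the pair is (s, s.drop r)
-- with r ≤ |s| and r ≡ k (mod |s|)
def RelState (k : Nat) (p : List Int × List Int) (s : List Int) : Prop :=
  p.1 = s ∧ ∃ r, r ≤ s.length ∧ r % s.length = k % s.length ∧ p.2 = s.drop r

lemma mod_succ_eq {r k n : Nat} (h : r % n = k % n) : (r + 1) % n = (k + 1) % n := by
  rw [Nat.add_mod, Nat.add_mod k, h]

lemma relState_step {k : Nat} {p : List Int × List Int} {s : List Int}
    (hs : s ≠ []) (h : RelState k p s) :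
    (cycleNext p.1 p.2).1 = s.getD (k % s.length) 0 ∧
    RelState (k + 1) (p.1, (cycleNext p.1 p.2).2) s := by
  obtain ⟨p1, p2⟩ := p
  obtain ⟨h1, r, hr, hmod, h2⟩ := h
  have hn : 0 < s.length := List.length_pos_iff.mpr hs
  simp only at h1 h2 ⊢
  rw [h1, h2]
  match hrem : s.drop r with
  | [] =>
    have hrn : r = s.length := by
      have := (List.drop_eq_nil_iff).mp hrem
      omega
    have hk0 : k % s.length = 0 := by
      rw [← hmod, hrn, Nat.mod_self]
    obtain ⟨a, t, rfl⟩ := List.exists_cons_of_ne_nil hs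
    simp only [List.length_cons] at hk0
    refine ⟨by simp [cycleNext, hk0], rfl, 1, by simp, ?_, by simp [cycleNext]⟩
    have h0 : (0 : Nat) % (t.length + 1) = k % (t.length + 1) := by simp [hk0]
    simpa using mod_succ_eq h0
  | h' :: t' =>
    have hrlt : r < s.length := by
      by_contra hge
      have : s.drop r = [] := List.drop_eq_nil_iff.mpr (by omega)
      simp [this] at hrem
    have hrk : r = k % s.length := by
      rw [← hmod, Nat.mod_eq_of_lt hrlt]
    have h0 : s[r]? = some h' := by
      rw [← Nat.add_zero r, ← List.getElem?_drop, hrem]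
      rfl
    refine ⟨?_, rfl, r + 1, by omega, mod_succ_eq hmod, ?_⟩
    · rw [← hrk]
      simp [cycleNext, List.getD_eq_getElem?_getD, h0]
    · have hdt : s.drop (r + 1) = t' := by
        have h1d : s.drop (r + 1) = (s.drop r).drop 1 := by
          rw [List.drop_drop, Nat.add_comm]
        simp [h1d, hrem]
      simp [cycleNext, hdt]

lemma forall2_vals {k : Nat} {states : List (List Int × List Int)} {it : List (List Int)}
    (hrel : List.Forall₂ (RelState k) states it) :
    (∀ s ∈ it, s ≠ []) →
    (states.map fun p => (cycleNext p.1 p.2).1) = it.map fun s => s.getD (k % s.length) 0 := by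
  induction hrel with
  | nil => simp
  | @cons p s l1 l2 h _ ih =>
    intro hne
    simp only [List.map_cons]
    rw [(relState_step (hne s List.mem_cons_self) h).1,
        ih fun x hx => hne x (List.mem_cons_of_mem _ hx)]

lemma forall2_step {k : Nat} {states : List (List Int × List Int)} {it : List (List Int)}
    (hrel : List.Forall₂ (RelState k) states it) :
    (∀ s ∈ it, s ≠ []) →
    List.Forall₂ (RelState (k + 1))
      (states.map fun p => (p.1, (cycleNext p.1 p.2).2)) it := by
  induction hrel with
  | nil => simp
  | @cons p s l1 l2 h _ ih =>
    intro hne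
    exact List.Forall₂.cons (relState_step (hne s List.mem_cons_self) h).2
      (ih fun x hx => hne x (List.mem_cons_of_mem _ hx))

lemma loopA_eq (n : Nat) :
    ∀ (k : Nat) (states : List (List Int × List Int)) (it : List (List Int)),
    List.Forall₂ (RelState k) states it → (∀ s ∈ it, s ≠ []) →
    loopA states n = (List.range n).map
      (fun j => it.map fun s => s.getD ((k + j) % s.length) 0) := by
  induction n with
  | zero => intro k states it _ _; simp [loopA]
  | succ m ih =>
    intro k states it hrel hne
    rw [List.range_succ_eq_map]
    simp only [loopA, List.map_cons, List.map_map]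
    rw [forall2_vals hrel hne, ih (k + 1) _ it (forall2_step hrel hne) hne]
    refine congrArg₂ _ (by simp) ?_
    apply List.map_congr_left
    intro j _
    have : k + 1 + j = k + (j + 1) := by omega
    simp [Function.comp, Nat.succ_eq_add_one, this]

lemma relState_init (it : List (List Int)) :
    List.Forall₂ (RelState 0) (it.map fun s => (s, s)) it := by
  induction it with
  | nil => simp
  | cons s t ih =>
    exact List.Forall₂.cons ⟨rfl, 0, by simp, rfl, by simp⟩ ih

-- ===== VERDICT (by name: the statement is the Claim_ definition above) =====
theorem zip_recycle_spec : Claim_equal_zip_recycle := by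
  intro iterable _
  unfold Spec_zip_recycle zip_recycle zip_recycle_alt
  by_cases hempty : iterable = []
  · simp [hempty]
  · have hlen : ¬ iterable.length = 0 := by simpa [List.length_eq_zero_iff] using hempty
    by_cases hany : iterable.any List.isEmpty
    · have hc : (0 : Nat) ∈ iterable.map List.length := by
        rcases List.any_eq_true.mp hany with ⟨s, hs, hse⟩
        exact List.mem_map.mpr ⟨s, hs, by simp [List.isEmpty_iff.mp hse]⟩
      simp [hlen, hempty, hany, hc]
    · have hne : ∀ s ∈ iterable, s ≠ [] := by
        intro s hs hcon
        exact hany (List.any_eq_true.mpr ⟨s, hs, by simp [hcon]⟩)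
      have hc : (0 : Nat) ∉ iterable.map List.length := by
        intro hmem
        rcases List.mem_map.mp hmem with ⟨s, hs, hlen0⟩
        exact hne s hs (List.length_eq_zero_iff.mp hlen0)
      simp only [if_neg hlen, if_neg hempty]
      rw [if_neg (by simpa using hany), if_neg (by simpa using hc)]
      have := loopA_eq ((iterable.map List.length).max?.getD 0) 0
        (iterable.map fun s => (s, s)) iterable (relState_init iterable) hne
      simpa using this
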